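-- pv_equiv track=rewrite | github.com/balalnaeem/neet_code | arrays_hashing/largest_substring.py | max_len_between_equal_chars
-- ===== SOURCE A (Python) =====
-- def max_len_between_equal_chars(s):
--     char_indices = {}
--     max_substr_len = -1
--
--     for idx in range(len(s)):
--         char = s[idx]
--         if char in char_indices:
--             cur_substr_len = idx - (char_indices[char] + 1)
--             max_substr_len = max(cur_substr_len, max_substr_len)
--         else:
--             char_indices[char] = idx
--
--     return max_substr_len
-- ===== SOURCE B (Python) =====
-- def max_len_between_equal_chars(s):
--     # For each distinct character, the span strictly between its first and
--     # last occurrence is s.rfind(c) - s.find(c) - 1 (equal to -1 when the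
--     # character occurs once). The answer is the maximum, -1 if s is empty.
--     return max((s.rfind(c) - s.find(c) - 1 for c in set(s)), default=-1)
-- ===== Notes on version B (the rewrite author's own statement) =====
-- stated objective: faster
-- what changed: Replaces A's single Python-level pass with a first-occurrence dict by a max over the distinct characters of s.rfind(c) - s.find(c) - 1 (default -1), i.e. per-character C-level library scans instead of an interpreted loop.
import Mathlib
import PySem

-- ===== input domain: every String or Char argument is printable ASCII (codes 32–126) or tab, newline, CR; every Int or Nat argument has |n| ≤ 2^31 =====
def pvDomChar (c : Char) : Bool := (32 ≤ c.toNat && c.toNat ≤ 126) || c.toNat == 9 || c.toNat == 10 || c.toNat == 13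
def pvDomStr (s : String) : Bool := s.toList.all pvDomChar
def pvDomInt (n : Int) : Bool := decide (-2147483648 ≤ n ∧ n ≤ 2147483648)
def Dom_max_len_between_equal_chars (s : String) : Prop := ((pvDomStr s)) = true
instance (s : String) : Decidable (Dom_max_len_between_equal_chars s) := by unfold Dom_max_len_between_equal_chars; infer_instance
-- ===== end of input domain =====

-- B replaces A's single interpreted pass with a first-occurrence dict by a max over the
-- distinct characters of rfind(c) - find(c) - 1 (default -1): library scans per character.

-- ===== PORT A =====
-- A's loop 'for idx in range(len(s)): char = s[idx]; …' walks the index/character pairs: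
-- ported as a fold over 'enumerate s.toList 0' carrying (char_indices, max_substr_len).
-- 'char_indices[char]' is read as (get? …).getD 0: it only runs in the branch where
-- 'char in char_indices' holds, where get? is some, so the default is never used (exact).
def max_len_between_equal_chars (s : String) : Int :=
  ((PySem.List.enumerate s.toList 0).foldl
    (fun st p =>
      if PySem.Dict.contains st.1 p.2 then
        (st.1, max (p.1 - ((PySem.Dict.get? st.1 p.2).getD 0 + 1)) st.2)
      else
        (PySem.Dict.insert st.1 p.2 p.1, st.2))
    ((PySem.Dict.empty : PySem.Dict Char Int), -1)).2

-- ===== PORT B =====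
-- Source B: max((s.rfind(c) - s.find(c) - 1 for c in set(s)), default=-1).
-- Python's max over the set is order-independent, so the fold over Set.ofList is exact.
def max_len_between_equal_chars_alt (s : String) : Int :=
  (PySem.Set.ofList s.toList).foldl
    (fun m c => max m (PySem.Str.rfind s (String.ofList [c]) - PySem.Str.find s (String.ofList [c]) - 1))
    (-1)

-- ===== PRECONDITION & SPEC =====
def Spec_max_len_between_equal_chars (s : String) (out : Int) : Prop := out = max_len_between_equal_chars_alt s
instance (s : String) (out : Int) : Decidable (Spec_max_len_between_equal_chars s out) := by unfold Spec_max_len_between_equal_chars; infer_instance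

-- ===== CLAIM (what is proved, stated in full; the proofs are below) =====
def Claim_equal_max_len_between_equal_chars : Prop := ∀ (s : String), Dom_max_len_between_equal_chars s → Spec_max_len_between_equal_chars s (max_len_between_equal_chars s)

-- ===== LEMMAS AND PROOFS =====

-- abbreviations for the proof (first / last occurrence index of a single character)
def pvFF (l : List Char) (c : Char) : Int := PySem.Chars.find l [c]
def pvRF (l : List Char) (c : Char) : Int := PySem.Chars.rfind l [c]

-- the common middle form: max over the distinct characters of last - first - 1
def pvM (l : List Char) : Int :=
  ((PySem.List.dedup l).map (fun c => pvRF l c - pvFF l c - 1)).foldl max (-1)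

-- ---- singleton prefix / infix characterisations ----

theorem pv_singleton_prefix_iff (c : Char) (xs : List Char) :
    [c] <+: xs ↔ xs.head? = some c := by
  cases xs with
  | nil => simp
  | cons x t => simp [List.cons_prefix_cons, eq_comm]

theorem pv_singleton_isPrefixOf (c : Char) (xs : List Char) :
    [c].isPrefixOf xs = (xs.head? == some c) := by
  cases xs with
  | nil => simp [List.isPrefixOf]
  | cons x t =>
      simp [List.isPrefixOf]
      exact eq_comm

theorem pv_singleton_infix_iff (c : Char) (l : List Char) :
    [c] <:+: l ↔ c ∈ l := by
  constructor
  · intro h; exact h.subset (by simp)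
  · intro h
    obtain ⟨a, b, rfl⟩ := List.append_of_mem h
    exact ⟨a, b, by simp⟩

-- ---- first-occurrence (find) lemmas ----

theorem pv_ff_spec (l : List Char) (c : Char) (h : c ∈ l) :
    0 ≤ pvFF l c ∧ l[(pvFF l c).toNat]? = some c ∧
      ∀ j < (pvFF l c).toNat, l[j]? ≠ some c := by
  have h0 : 0 ≤ pvFF l c :=
    (PySem.Chars.find_nonneg_iff l [c]).mpr ((pv_singleton_infix_iff c l).mpr h)
  obtain ⟨h1, h2⟩ := PySem.Chars.find_spec h0
  refine ⟨h0, ?_, ?_⟩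
  · have := (pv_singleton_prefix_iff c _).mp h1
    rwa [List.head?_drop] at this
  · intro j hj hgj
    exact h2 j hj ((pv_singleton_prefix_iff c _).mpr (by rwa [List.head?_drop]))

theorem pv_ff_unique (l : List Char) (c : Char) (i : Nat)
    (h1 : l[i]? = some c) (h2 : ∀ j < i, l[j]? ≠ some c) :
    pvFF l c = (i : Int) := by
  obtain ⟨h0, hk1, hk2⟩ := pv_ff_spec l c (List.mem_of_getElem? h1)
  rcases lt_trichotomy (pvFF l c).toNat i with hlt | heq | hgt
  · exact absurd hk1 (h2 _ hlt)
  · omega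
  · exact absurd h1 (hk2 _ hgt)

theorem pv_ff_append_new (l : List Char) (c : Char) (h : c ∉ l) :
    pvFF (l ++ [c]) c = (l.length : Int) := by
  apply pv_ff_unique
  · rw [List.getElem?_append_right (le_refl _)]
    simp
  · intro j hj hgj
    rw [List.getElem?_append_left hj] at hgj
    exact h (List.mem_of_getElem? hgj)

theorem pv_ff_append_old (l : List Char) (c c' : Char) (h : c' ∈ l) :
    pvFF (l ++ [c]) c' = pvFF l c' := by
  obtain ⟨h0, h1, h2⟩ := pv_ff_spec l c' h
  have hlen : (pvFF l c').toNat < l.length := by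
    by_contra hge
    rw [List.getElem?_eq_none (by omega)] at h1
    simp at h1
  have : pvFF (l ++ [c]) c' = ((pvFF l c').toNat : Int) := by
    apply pv_ff_unique
    · rwa [List.getElem?_append_left hlen]
    · intro j hj
      rw [List.getElem?_append_left (by omega)]
      exact h2 j hj
  rw [this]; omega

-- ---- last-occurrence (rfind) lemmas ----

theorem pv_rf_go_le (l : List Char) (sub : List Char) (j : Nat) :
    PySem.Chars.rfind.go l sub j ≤ (j : Int) := by
  induction j with
  | zero => simp only [PySem.Chars.rfind.go]; split <;> simp
  | succ j ih =>
      rw [PySem.Chars.rfind.go]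
      split
      · push_cast; simp
      · exact le_trans ih (by push_cast; omega)

theorem pv_rf_le (l : List Char) (c : Char) : pvRF l c ≤ (l.length : Int) := by
  exact pv_rf_go_le l [c] l.length

theorem pv_rf_append_self (l : List Char) (c : Char) :
    pvRF (l ++ [c]) c = (l.length : Int) := by
  show PySem.Chars.rfind.go (l ++ [c]) [c] (l ++ [c]).length = (l.length : Int)
  rw [List.length_append, List.length_cons, List.length_nil, Nat.add_zero]
  rw [PySem.Chars.rfind.go]
  have hdrop : (l ++ [c]).drop (l.length + 1) = [] :=
    List.drop_eq_nil_of_le (by simp)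
  rw [hdrop]
  simp only [List.isPrefixOf, Bool.false_eq_true, if_false]
  cases hn : l.length with
  | zero =>
      have hl : l = [] := List.eq_nil_of_length_eq_zero hn
      subst hl
      simp [PySem.Chars.rfind.go, List.isPrefixOf]
  | succ m =>
      rw [PySem.Chars.rfind.go]
      have : (l ++ [c]).drop (m + 1) = [c] := by
        have := List.drop_left (l₁ := l) (l₂ := [c])
        rwa [hn] at this
      rw [this]
      simp [List.isPrefixOf]

theorem pv_head_append_ne (l : List Char) (c c' : Char) (h : c' ≠ c) :
    ((l ++ [c]).head? == some c') = (l.head? == some c') := by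
  cases l with
  | nil => simpa using fun hh => h hh.symm
  | cons x t => simp

theorem pv_rf_go_append (l : List Char) (c c' : Char) (h : c' ≠ c) (j : Nat)
    (hj : j ≤ l.length) :
    PySem.Chars.rfind.go (l ++ [c]) [c'] j = PySem.Chars.rfind.go l [c'] j := by
  induction j with
  | zero =>
      simp only [PySem.Chars.rfind.go]
      rw [pv_singleton_isPrefixOf, pv_singleton_isPrefixOf, pv_head_append_ne l c c' h]
  | succ j ih =>
      rw [PySem.Chars.rfind.go, PySem.Chars.rfind.go]
      rw [List.drop_append_of_le_length hj]
      rw [pv_singleton_isPrefixOf, pv_singleton_isPrefixOf ,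
          pv_head_append_ne (l.drop (j+1)) c c' h]
      split
      · rfl
      · exact ih (by omega)

theorem pv_rf_append_ne (l : List Char) (c c' : Char) (h : c' ≠ c) :
    pvRF (l ++ [c]) c' = pvRF l c' := by
  show PySem.Chars.rfind.go (l ++ [c]) [c'] (l ++ [c]).length = PySem.Chars.rfind l [c']
  rw [List.length_append, List.length_cons, List.length_nil, Nat.add_zero]
  rw [PySem.Chars.rfind.go]
  have hdrop : (l ++ [c]).drop (l.length + 1) = [] :=
    List.drop_eq_nil_of_le (by simp)
  rw [hdrop]
  simp only [List.isPrefixOf, Bool.false_eq_true, if_false]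
  exact pv_rf_go_append l c c' h l.length (le_refl _)

-- ---- foldl max lemmas ----

theorem pv_fm_base (L : List Int) (a b : Int) :
    L.foldl max (max a b) = max (L.foldl max a) b := by
  induction L generalizing a with
  | nil => rfl
  | cons x t ih => simp only [List.foldl_cons]
                   rw [max_right_comm, ih]

theorem pv_fm_ge (L : List Int) (a : Int) : a ≤ L.foldl max a := by
  induction L generalizing a with
  | nil => simp
  | cons x t ih => exact le_trans (le_max_left a x) (ih _)

theorem pv_fm_congr (xs : List Char) (f g : Char → Int) (a : Int)
    (h : ∀ x ∈ xs, f x = g x) :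
    (xs.map f).foldl max a = (xs.map g).foldl max a := by
  induction xs generalizing a with
  | nil => rfl
  | cons x t ih =>
      simp only [List.map_cons, List.foldl_cons]
      rw [h x (by simp), ih _ (fun y hy => h y (by simp [hy]))]

theorem pv_fm_update (xs : List Char) (f g : Char → Int) (a : Int) (c : Char)
    (hnd : xs.Nodup) (hc : c ∈ xs)
    (hoff : ∀ x ∈ xs, x ≠ c → f x = g x) (hle : f c ≤ g c) :
    (xs.map g).foldl max a = max ((xs.map f).foldl max a) (g c) := by
  induction xs generalizing a with
  | nil => cases hc
  | cons x t ih =>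
      simp only [List.map_cons, List.foldl_cons]
      rcases List.mem_cons.mp hc with heq | hct
      · subst heq
        have hnt : c ∉ t := (List.nodup_cons.mp hnd).1
        rw [pv_fm_congr t g f _ (fun y hy => (hoff y (by simp [hy]) (fun h => hnt (h ▸ hy))).symm)]
        rw [pv_fm_base (t.map f) a (g c), pv_fm_base (t.map f) a (f c)]
        rw [max_assoc, max_eq_right hle]
      · have hxc : x ≠ c := fun h => (List.nodup_cons.mp hnd).1 (h ▸ hct)
        rw [hoff x (by simp) hxc]
        exact ih (max a (g x)) (List.nodup_cons.mp hnd).2 hct (fun y hy hyne => hoff y (by simp [hy]) hyne)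

-- ---- the middle form under appending one character ----

theorem pv_M_append_new (l : List Char) (c : Char) (h : c ∉ l) :
    pvM (l ++ [c]) = pvM l := by
  unfold pvM
  rw [PySem.List.dedup_eq_ofList, PySem.List.dedup_eq_ofList,
      PySem.Set.ofList_append_singleton,
      PySem.Set.add_of_not_mem (by rw [PySem.Set.mem_ofList]; exact h),
      List.map_append, List.foldl_append]
  rw [pv_fm_congr (PySem.Set.ofList l)
        (fun c' => pvRF (l ++ [c]) c' - pvFF (l ++ [c]) c' - 1)
        (fun c' => pvRF l c' - pvFF l c' - 1) (-1)
        (fun c' hc' => by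
          have hmem : c' ∈ l := (PySem.Set.mem_ofList l c').mp hc'
          have hne : c' ≠ c := fun hh => h (hh ▸ hmem)
          simp only [pv_rf_append_ne l c c' hne, pv_ff_append_old l c c' hmem])]
  simp only [List.map_cons, List.map_nil, List.foldl_cons, List.foldl_nil]
  rw [pv_rf_append_self, pv_ff_append_new l c h]
  have : (l.length : Int) - (l.length : Int) - 1 = -1 := by ring
  rw [this]
  exact max_eq_left (pv_fm_ge _ _)

theorem pv_M_append_old (l : List Char) (c : Char) (h : c ∈ l) :
    pvM (l ++ [c]) = max ((l.length : Int) - (pvFF l c + 1)) (pvM l) := by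
  unfold pvM
  rw [PySem.List.dedup_eq_ofList, PySem.List.dedup_eq_ofList,
      PySem.Set.ofList_append_singleton,
      PySem.Set.add_of_mem (by rw [PySem.Set.mem_ofList]; exact h)]
  rw [pv_fm_update (PySem.Set.ofList l)
        (fun c' => pvRF l c' - pvFF l c' - 1)
        (fun c' => pvRF (l ++ [c]) c' - pvFF (l ++ [c]) c' - 1) (-1) c
        (PySem.Set.nodup_ofList l)
        ((PySem.Set.mem_ofList l c).mpr h)
        (fun c' hc' hne => by
          have hmem : c' ∈ l := (PySem.Set.mem_ofList l c').mp hc'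
          simp only [pv_rf_append_ne l c c' hne, pv_ff_append_old l c c' hmem])
        (by
          simp only [pv_rf_append_self, pv_ff_append_old l c c h]
          have := pv_rf_le l c
          omega)]
  rw [max_comm]
  simp only [pv_rf_append_self, pv_ff_append_old l c c h]
  congr 1
  ring

-- ---- A's fold equals pvM, with the dict mapping chars to first indices ----

def pvStepA (st : PySem.Dict Char Int × Int) (p : Int × Char) : PySem.Dict Char Int × Int :=
  if PySem.Dict.contains st.1 p.2 then
    (st.1, max (p.1 - ((PySem.Dict.get? st.1 p.2).getD 0 + 1)) st.2)
  else
    (PySem.Dict.insert st.1 p.2 p.1, st.2)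

def pvStateA (l : List Char) : PySem.Dict Char Int × Int :=
  (PySem.List.enumerate l 0).foldl pvStepA (PySem.Dict.empty, -1)

theorem pv_stateA_append (l : List Char) (c : Char) :
    pvStateA (l ++ [c]) = pvStepA (pvStateA l) ((l.length : Int), c) := by
  unfold pvStateA
  rw [PySem.List.enumerate_append, List.foldl_append]
  simp [PySem.List.enumerate]

theorem pv_stateA_inv (l : List Char) :
    (∀ c : Char, PySem.Dict.get? (pvStateA l).1 c =
        (if c ∈ l then some (pvFF l c) else none)) ∧
      (pvStateA l).2 = pvM l := by
  induction l using List.reverseRecOn with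
  | nil =>
      constructor
      · intro c; rfl
      · rfl
  | append_singleton l c ih =>
      obtain ⟨ihd, ihm⟩ := ih
      rw [pv_stateA_append]
      by_cases hc : c ∈ l
      · have hget : PySem.Dict.get? (pvStateA l).1 c = some (pvFF l c) := by
          rw [ihd c, if_pos hc]
        have hcon : PySem.Dict.contains (pvStateA l).1 c = true := by
          rw [PySem.Dict.contains_eq_isSome_get?, hget]; rfl
        unfold pvStepA
        rw [if_pos hcon]
        constructor
        · intro c'
          simp only
          rw [ihd c']
          by_cases hc' : c' ∈ l
          · rw [if_pos hc', if_pos (by simp [hc']), pv_ff_append_old l c c' hc']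
          · have : c' ∉ l ++ [c] := by
              simp only [List.mem_append, List.mem_singleton]
              rintro (h1 | rfl)
              · exact hc' h1
              · exact hc' hc
            rw [if_neg hc', if_neg this]
        · simp only [hget, Option.getD_some, ihm]
          exact (pv_M_append_old l c hc).symm
      · have hget : PySem.Dict.get? (pvStateA l).1 c = none := by
          rw [ihd c, if_neg hc]
        have hcon : PySem.Dict.contains (pvStateA l).1 c = false := by
          rw [PySem.Dict.contains_eq_isSome_get?, hget]; rfl
        unfold pvStepA
        rw [if_neg (by simp [hcon])]
        constructor
        · intro c'
          simp only
          by_cases hcc : c' = c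
          · subst hcc
            rw [PySem.Dict.get?_insert_self, if_pos (by simp),
                pv_ff_append_new l c' hc]
          · rw [PySem.Dict.get?_insert_of_ne _ _ hcc, ihd c']
            by_cases hc' : c' ∈ l
            · rw [if_pos hc', if_pos (by simp [hc']), pv_ff_append_old l c c' hc']
            · rw [if_neg hc', if_neg (by simp [hc', hcc])]
        · simp only [ihm]
          exact (pv_M_append_new l c hc).symm

theorem pv_B_eq_M (s : String) : max_len_between_equal_chars_alt s = pvM s.toList := by
  unfold max_len_between_equal_chars_alt pvM
  rw [PySem.List.dedup_eq_ofList, List.foldl_map]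
  simp [pvRF, pvFF]

-- ===== VERDICT (by name: the statement is the Claim_ definition above) =====
theorem max_len_between_equal_chars_spec : Claim_equal_max_len_between_equal_chars := by
  intro s _
  unfold Spec_max_len_between_equal_chars
  rw [pv_B_eq_M]
  exact (pv_stateA_inv s.toList).2
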